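-- pv_equiv track=rewrite | github.com/contrivancecompanychicago/geneCRISpy | MarkovChain.py | _create_transition_matrix
-- ===== SOURCE A (Python) =====
-- def _create_transition_matrix(gene):
--   """Creates a transition matrix for a gene.
--
--   Args:
--     gene: A string representing the gene.
--
--   Returns:
--     A matrix representing the transition probabilities of the Markov chain.
--   """
--
--   transition_matrix = [[0 for i in range(len(gene))] for j in range(len(gene))]
--   for i in range(len(gene)):
--     for j in range(len(gene)):
--       if gene[i] == gene[j]:
--         transition_matrix[i][j] = 1
--       else:
--         transition_matrix[i][j] = 0
--
--   return transition_matrix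
-- ===== SOURCE B (Python) =====
-- def _create_transition_matrix(gene):
--   """Creates a transition matrix for a gene.
--
--   Builds each distinct character's indicator row once and shares it across
--   all positions holding that character, instead of comparing every pair.
--   """
--   rows = {}
--   for c in gene:
--     if c not in rows:
--       rows[c] = [1 if d == c else 0 for d in gene]
--   return [rows[c] for c in gene]
-- ===== Notes on version B (the rewrite author's own statement) =====
-- stated objective: faster
-- what changed: Instead of an n*n double loop of pairwise comparisons filling a mutable matrix, B builds one indicator row per distinct character in a single pass (a dict keyed by character) and assembles the matrix by looking each position's shared row up.
import Mathlib
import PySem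

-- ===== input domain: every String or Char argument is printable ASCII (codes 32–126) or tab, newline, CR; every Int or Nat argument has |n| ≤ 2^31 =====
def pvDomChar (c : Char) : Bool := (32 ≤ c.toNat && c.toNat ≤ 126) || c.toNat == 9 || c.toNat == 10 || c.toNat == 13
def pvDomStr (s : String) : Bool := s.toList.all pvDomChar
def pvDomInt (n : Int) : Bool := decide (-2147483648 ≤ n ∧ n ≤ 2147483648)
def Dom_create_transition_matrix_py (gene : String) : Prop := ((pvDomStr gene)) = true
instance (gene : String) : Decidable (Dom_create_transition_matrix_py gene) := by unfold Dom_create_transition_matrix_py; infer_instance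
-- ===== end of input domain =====

-- B builds one indicator row per distinct character (dict) and shares it, instead of A's n×n pairwise-comparison double loop; objective: faster.


-- ===== PORT A =====
-- transliteration of A: n×n zero matrix, then a double loop over indices setting each cell
-- to 1/0 by comparing gene[i] with gene[j] (indices are always in range, so gene[i] is read
-- with getD; the in-place assignment becomes List.set on the row and on the matrix).
def create_transition_matrix_py (gene : String) : List (List Int) :=
  let chars := gene.toList
  let n := chars.length
  let init : List (List Int) := (List.range n).map (fun _ => (List.range n).map (fun _ => (0 : Int)))
  (List.range n).foldl (fun m i =>
    (List.range n).foldl (fun m j =>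
      m.set i ((m.getD i []).set j (if chars.getD i ' ' == chars.getD j ' ' then (1 : Int) else 0))) m) init

-- ===== PORT B =====
-- transliteration of B: fold over the characters building a dict char → indicator row
-- (insert only if absent), then map each character to its row.
def create_transition_matrix_py_alt (gene : String) : List (List Int) :=
  let chars := gene.toList
  let rows : PySem.Dict Char (List Int) :=
    chars.foldl (fun d c =>
      if d.contains c then d
      else d.insert c (chars.map (fun x => if x == c then (1 : Int) else 0))) PySem.Dict.empty
  chars.map (fun c => (rows.get? c).getD [])

-- ===== PRECONDITION & SPEC =====
def Spec_create_transition_matrix_py (gene : String) (out : List (List Int)) : Prop := out = create_transition_matrix_py_alt gene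
instance (gene : String) (out : List (List Int)) : Decidable (Spec_create_transition_matrix_py gene out) := by unfold Spec_create_transition_matrix_py; infer_instance

-- ===== CLAIM (what is proved, stated in full; the proofs are below) =====
def Claim_equal_create_transition_matrix_py : Prop := ∀ (gene : String), Dom_create_transition_matrix_py gene → Spec_create_transition_matrix_py gene (create_transition_matrix_py gene)

-- ===== LEMMAS AND PROOFS =====

-- setting at the exact length of the left part sets the head of the right part
theorem set_append_len {α : Type} (l1 : List α) (l2 : List α) (v : α) :
    (l1 ++ l2).set l1.length v = l1 ++ l2.set 0 v := by
  induction l1 with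
  | nil => simp
  | cons x l1 ih => simp [ih]

-- a fold of in-place sets over range k rewrites the first k entries to g 0 … g (k-1)
theorem set_foldl_range {α : Type} (g : Nat → α) :
    ∀ (k : Nat) (r0 : List α), k ≤ r0.length →
      (List.range k).foldl (fun r j => r.set j (g j)) r0 = (List.range k).map g ++ r0.drop k := by
  intro k
  induction k with
  | zero => intro r0 _; simp
  | succ k ih =>
    intro r0 hk
    have hk' : k ≤ r0.length := Nat.le_of_succ_le hk
    have hklt : k < r0.length := hk
    rw [List.range_succ, List.foldl_append, ih r0 hk', List.foldl_cons, List.foldl_nil]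
    have hdrop : r0.drop k = r0[k] :: r0.drop (k + 1) := List.drop_eq_getElem_cons hklt
    have hset := set_append_len ((List.range k).map g) (r0[k] :: r0.drop (k + 1)) (g k)
    have hlen : ((List.range k).map g).length = k := by simp
    rw [hlen] at hset
    rw [hdrop, hset, List.map_append]
    simp only [List.set_cons_zero, List.map_cons, List.map_nil]
    simp

-- the inner fold only touches row i through set, so it equals setting row i to the row-fold result
theorem inner_fold_set {i : Nat} (v : Nat → Int) :
    ∀ (k : Nat) (m : List (List Int)), i < m.length →
      (List.range k).foldl (fun m j => m.set i ((m.getD i []).set j (v j))) m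
        = m.set i ((List.range k).foldl (fun r j => r.set j (v j)) (m.getD i [])) := by
  intro k
  induction k with
  | zero =>
    intro m hm
    simp only [List.range_zero, List.foldl_nil, List.getD_eq_getElem?_getD,
      List.getElem?_eq_getElem hm, Option.getD_some, List.set_getElem_self]
  | succ k ih =>
    intro m hm
    rw [List.range_succ, List.foldl_append, List.foldl_append, ih m hm,
      List.foldl_cons, List.foldl_nil, List.foldl_cons, List.foldl_nil]
    have hi : i < (m.set i ((List.range k).foldl (fun r j => r.set j (v j)) (m.getD i []))).length := by
      simpa using hm
    rw [List.getD_eq_getElem _ [] hi]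
    simp [hm]

-- value of B's dict at any key
theorem dictB_get? (f : Char → List Int) :
    ∀ (l : List Char) (d : PySem.Dict Char (List Int)) (c : Char),
      ((l.foldl (fun d c => if d.contains c then d else d.insert c (f c)) d).get? c)
        = if d.contains c then d.get? c else if c ∈ l then some (f c) else none := by
  intro l
  induction l with
  | nil =>
    intro d c
    by_cases h : d.contains c
    · simp [h]
    · have hg : d.get? c = none := by
        have := PySem.Dict.contains_eq_isSome_get? d c
        cases hgc : d.get? c with
        | none => rfl
        | some v => rw [hgc] at this; simp [this] at h
      simp [h, hg]
  | cons x l ih =>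
    intro d c
    by_cases hx : d.contains x
    · rw [List.foldl_cons, if_pos hx, ih]
      by_cases hc : d.contains c
      · simp [hc]
      · by_cases hcx : c = x
        · subst hcx; exact absurd hx hc
        · simp [hc, hcx]
    · rw [List.foldl_cons, if_neg hx, ih]
      by_cases hcx : c = x
      · subst hcx
        simp [PySem.Dict.contains_insert_self, PySem.Dict.get?_insert_self, hx]
      · have hci : (d.insert x (f x)).contains c = d.contains c := by
          simp [PySem.Dict.contains_insert, hcx]
        rw [hci, PySem.Dict.get?_insert]
        by_cases hc : d.contains c <;> simp [hc, hcx]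

-- B computes the indicator-row map
theorem alt_eq_map (gene : String) :
    create_transition_matrix_py_alt gene
      = gene.toList.map (fun c => gene.toList.map (fun x => if x == c then (1 : Int) else 0)) := by
  unfold create_transition_matrix_py_alt
  apply List.map_congr_left
  intro c hc
  rw [dictB_get? (fun c => gene.toList.map (fun x => if x == c then (1 : Int) else 0)) gene.toList PySem.Dict.empty c]
  simp [hc]

-- indexing the double map over range by the list's own elements
theorem range_map_eq_char_map (chars : List Char) :
    (List.range chars.length).map (fun i => (List.range chars.length).map
        (fun j => if chars.getD i ' ' == chars.getD j ' ' then (1 : Int) else 0))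
      = chars.map (fun c => chars.map (fun x => if x == c then (1 : Int) else 0)) := by
  apply List.ext_getElem
  · simp
  · intro i h1 h2
    have hi : i < chars.length := by simpa using h2
    apply List.ext_getElem
    · simp
    · intro j g1 g2
      have hj : j < chars.length := by simpa using g2
      simp [List.getD_eq_getElem?_getD, List.getElem?_eq_getElem hi, List.getElem?_eq_getElem hj,
        BEq.comm]

-- A computes the same map
theorem a_eq_map (gene : String) :
    create_transition_matrix_py gene
      = gene.toList.map (fun c => gene.toList.map (fun x => if x == c then (1 : Int) else 0)) := by
  unfold create_transition_matrix_py
  set chars := gene.toList with hchars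
  set n := chars.length with hn
  set g : Nat → Nat → Int := fun i j => if chars.getD i ' ' == chars.getD j ' ' then (1 : Int) else 0 with hg
  set zrow : List Int := (List.range n).map (fun _ => (0 : Int)) with hzrow
  have hzlen : zrow.length = n := by simp [hzrow]
  -- outer invariant: after folding range k the matrix is the first k computed rows ++ untouched zero rows
  have key : ∀ (k : Nat), k ≤ n →
      (List.range k).foldl (fun m i =>
        (List.range n).foldl (fun m j =>
          m.set i ((m.getD i []).set j (g i j))) m)
        ((List.range n).map (fun _ => zrow))
      = (List.range k).map (fun i => (List.range n).map (g i))
          ++ ((List.range n).map (fun _ => zrow)).drop k := by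
    intro k
    induction k with
    | zero => intro _; simp
    | succ k ih =>
      intro hk
      have hk' : k ≤ n := Nat.le_of_succ_le hk
      rw [List.range_succ, List.foldl_append, ih hk', List.foldl_cons, List.foldl_nil]
      set m := (List.range k).map (fun i => (List.range n).map (g i))
          ++ ((List.range n).map (fun _ => zrow)).drop k with hm
      have hmlen : m.length = n := by simp [hm]; omega
      have hklt : k < m.length := by omega
      have hrowk : m[k] = zrow := by
        simp [hm, List.getElem_append_right, List.length_map, List.length_range]
      have hrow : m.getD k [] = zrow := by
        rw [List.getD_eq_getElem m [] hklt, hrowk]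
      rw [inner_fold_set (g k) n m hklt, hrow,
        set_foldl_range (g k) n zrow (le_of_eq hzlen.symm)]
      have hdrop0 : zrow.drop n = [] := by
        rw [List.drop_eq_nil_iff]; omega
      rw [hdrop0, List.append_nil]
      have hpre : ((List.range k).map (fun i => (List.range n).map (g i))).length = k := by simp
      have hzdrop : ((List.range n).map (fun _ => zrow)).drop k
          = zrow :: ((List.range n).map (fun _ => zrow)).drop (k + 1) := by
        rw [List.drop_eq_getElem_cons (by simp; omega)]
        simp
      have hset := set_append_len ((List.range k).map (fun i => (List.range n).map (g i)))
          (zrow :: ((List.range n).map (fun _ => zrow)).drop (k + 1)) ((List.range n).map (g k))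
      rw [hpre] at hset
      rw [hm, hzdrop, hset, List.set_cons_zero, List.map_append]
      simp
  have final := key n (le_refl n)
  rw [final, List.drop_eq_nil_iff.mpr (by simp), List.append_nil]
  exact range_map_eq_char_map chars

-- ===== VERDICT (by name: the statement is the Claim_ definition above) =====
theorem create_transition_matrix_py_spec : Claim_equal_create_transition_matrix_py := by
  intro gene _
  unfold Spec_create_transition_matrix_py
  rw [a_eq_map, alt_eq_map]
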